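-- pv_equiv track=rewrite | github.com/mooja/dailyprogrammer | challenge192easy.py | carries
-- ===== SOURCE A (Python) =====
-- def carries(nlist):
--     maxmag = len(str(max(nlist)))
--     carrydigits = [0]
--     for i in range(1, maxmag+1):
--         total = 0
--         for n in nlist:
--             total += n % (10**i)
--         d = (total // (10**i)) % 10
--         carrydigits.append(d)
--     carrydigits.reverse()
--     return ''.join(str(d) for d in carrydigits)
-- ===== SOURCE B (Python) =====
-- def carries(nlist):
--     m = len(str(max(nlist)))
--     qs = list(nlist)
--     carry = 0
--     out = ['0']
--     for _ in range(m):
--         col = carry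
--         for i, q in enumerate(qs):
--             col += q % 10
--             qs[i] = q // 10
--         carry = col // 10
--         out.append(str(carry % 10))
--     out.reverse()
--     return ''.join(out)
-- ===== Notes on version B (the rewrite author's own statement) =====
-- stated objective: alternative
-- what changed: A recomputes, for every column i, the whole-list sum of n % 10**i (growing moduli each pass); B makes one digit-at-a-time pass keeping a list of running quotients and a single running carry, emitting each carry digit as it goes.
import Mathlib
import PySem

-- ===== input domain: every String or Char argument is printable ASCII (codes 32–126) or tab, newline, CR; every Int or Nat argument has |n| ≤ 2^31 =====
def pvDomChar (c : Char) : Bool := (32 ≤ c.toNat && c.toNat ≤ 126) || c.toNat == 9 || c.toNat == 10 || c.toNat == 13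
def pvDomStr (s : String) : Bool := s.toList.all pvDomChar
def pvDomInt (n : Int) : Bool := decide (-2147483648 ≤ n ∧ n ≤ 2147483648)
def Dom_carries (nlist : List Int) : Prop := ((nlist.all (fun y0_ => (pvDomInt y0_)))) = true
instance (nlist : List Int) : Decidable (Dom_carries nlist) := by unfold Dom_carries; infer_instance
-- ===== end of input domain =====

-- B replaces A's per-column re-summation of n % 10**i (big moduli recomputed each column)
-- by one digit-at-a-time pass keeping per-number quotients and a running carry.

-- ===== PORT A =====
def carries (nlist : List Int) : String :=
  match PySem.List.max? nlist (fun x => x) with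
  | none => ""   -- Python raises ValueError on max([]); excluded by Pre_carries
  | some mx =>
    let maxmag := PySem.Str.len (PySem.Int.toStr mx)
    let carrydigits := (PySem.List.pyRange 1 (maxmag + 1) 1).foldl (fun acc i =>
      let total := nlist.foldl (fun t n => t + PySem.Int.mod n ((10:Int) ^ i.toNat)) 0
      acc ++ [PySem.Int.mod (PySem.Int.floordiv total ((10:Int) ^ i.toNat)) 10]) [(0:Int)]
    PySem.Str.join "" (carrydigits.reverse.map PySem.Int.toStr)

-- ===== PORT B =====
def carries_alt (nlist : List Int) : String :=
  match PySem.List.max? nlist (fun x => x) with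
  | none => ""   -- Python raises ValueError on max([]); excluded by Pre_carries
  | some mx =>
    let m := PySem.Str.len (PySem.Int.toStr mx)
    let st := (PySem.List.pyRange 0 m 1).foldl (fun (st : List Int × Int × List String) (_ : Int) =>
      let r := st.1.foldl (fun (p : Int × List Int) q =>
          (p.1 + PySem.Int.mod q 10, p.2 ++ [PySem.Int.floordiv q 10])) (st.2.1, [])
      let carry := PySem.Int.floordiv r.1 10
      (r.2, carry, st.2.2 ++ [PySem.Int.toStr (PySem.Int.mod carry 10)]))
      (nlist, 0, ["0"])
    PySem.Str.join "" st.2.2.reverse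

-- ===== PRECONDITION & SPEC =====
-- Pre_ excludes only the empty list, on which Python's max([]) raises ValueError.
def Pre_carries (nlist : List Int) : Prop := nlist ≠ []
instance (nlist : List Int) : Decidable (Pre_carries nlist) := by unfold Pre_carries; infer_instance
def pvWitness_carries : List Int := [85, 433, 11, 5]

def Spec_carries (nlist : List Int) (out : String) : Prop := out = carries_alt nlist
instance (nlist : List Int) (out : String) : Decidable (Spec_carries nlist out) := by unfold Spec_carries; infer_instance

-- ===== CLAIM (what is proved, stated in full; the proofs are below) =====
def Claim_equal_carries : Prop := ∀ (nlist : List Int), Dom_carries nlist → Pre_carries nlist → Spec_carries nlist (carries nlist)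

-- ===== LEMMAS AND PROOFS =====

-- total of n % 10^j over the list, as in A's inner loop
def pvT (xs : List Int) (j : Nat) : Int := xs.foldl (fun t n => t + PySem.Int.mod n ((10:Int) ^ j)) 0
-- the carry out of the first j columns
def pvC (xs : List Int) (j : Nat) : Int := PySem.Int.floordiv (pvT xs j) ((10:Int) ^ j)
-- column sum of the j-th digits
def pvS (xs : List Int) (j : Nat) : Int := (xs.map (fun n => PySem.Int.mod (PySem.Int.floordiv n ((10:Int) ^ j)) 10)).sum

theorem pv_foldl_add (xs : List Int) (g : Int → Int) (a : Int) :
    xs.foldl (fun t n => t + g n) a = a + (xs.map g).sum := by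
  induction xs generalizing a with
  | nil => simp
  | cons x t ih => simp [List.foldl_cons, ih, add_assoc]

theorem pv_foldl_snoc {α β : Type} (l : List α) (f : α → β) (init : List β) :
    l.foldl (fun acc x => acc ++ [f x]) init = init ++ l.map f := by
  induction l generalizing init with
  | nil => simp
  | cons x t ih => simp [List.foldl_cons, ih]

theorem pv_mod_succ (n : Int) (j : Nat) :
    PySem.Int.mod n ((10:Int) ^ (j+1)) =
      PySem.Int.mod n ((10:Int) ^ j) + (10:Int) ^ j * PySem.Int.mod (PySem.Int.floordiv n ((10:Int) ^ j)) 10 := by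
  have hp : (0:Int) < 10 ^ j := by positivity
  rw [PySem.Int.mod_eq_emod_of_pos (show (0:Int) < 10 ^ (j+1) by positivity),
      PySem.Int.mod_eq_emod_of_pos hp,
      PySem.Int.floordiv_eq_ediv_of_pos hp,
      PySem.Int.mod_eq_emod_of_pos (show (0:Int) < 10 by norm_num),
      pow_succ, Int.emod_def n ((10:Int) ^ j * 10), Int.emod_def n ((10:Int) ^ j),
      Int.emod_def (n / (10:Int) ^ j) 10, ← Int.ediv_ediv_of_nonneg (le_of_lt hp)]
  ring

theorem pvT_succ (xs : List Int) (j : Nat) :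
    pvT xs (j+1) = pvT xs j + (10:Int) ^ j * pvS xs j := by
  unfold pvT pvS
  rw [pv_foldl_add, pv_foldl_add]
  simp only [zero_add]
  induction xs with
  | nil => simp
  | cons x t ih =>
    simp only [List.map_cons, List.sum_cons]
    rw [pv_mod_succ x j, ih]
    ring

theorem pvC_zero (xs : List Int) : pvC xs 0 = 0 := by
  unfold pvC pvT
  rw [pv_foldl_add]
  have h : xs.map (fun n => PySem.Int.mod n ((10:Int) ^ 0)) = xs.map (fun _ => (0:Int)) := by
    apply List.map_congr_left
    intro n _
    rw [pow_zero, PySem.Int.mod_eq_emod_of_pos (show (0:Int) < 1 by norm_num)]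
    exact Int.emod_one n
  rw [h]
  simp [PySem.Int.floordiv]

theorem pvC_succ (xs : List Int) (j : Nat) :
    pvC xs (j+1) = PySem.Int.floordiv (pvC xs j + pvS xs j) 10 := by
  have hp : (0:Int) < 10 ^ j := by positivity
  unfold pvC
  rw [PySem.Int.floordiv_eq_ediv_of_pos (show (0:Int) < 10 ^ (j+1) by positivity),
      PySem.Int.floordiv_eq_ediv_of_pos hp,
      PySem.Int.floordiv_eq_ediv_of_pos (show (0:Int) < 10 by norm_num),
      pvT_succ]
  set T := pvT xs j with hT
  set S := pvS xs j with hS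
  have hdecomp : T = (10:Int) ^ j * (T / 10 ^ j) + T % 10 ^ j := (Int.mul_ediv_add_emod T _).symm
  have hr0 : 0 ≤ T % 10 ^ j := Int.emod_nonneg T (by positivity)
  have hrlt : T % 10 ^ j < 10 ^ j := Int.emod_lt_of_pos T hp
  calc (T + 10 ^ j * S) / 10 ^ (j+1)
      = (T % 10 ^ j + 10 ^ j * (T / 10 ^ j + S)) / (10 ^ j * 10) := by
        rw [pow_succ]
        congr 1
        rw [(by ring : T % 10 ^ j + (10:Int) ^ j * (T / 10 ^ j + S) = ((10:Int) ^ j * (T / 10 ^ j) + T % 10 ^ j) + 10 ^ j * S), ← hdecomp]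
    _ = (T % 10 ^ j + 10 ^ j * (T / 10 ^ j + S)) / 10 ^ j / 10 := by
        rw [Int.ediv_ediv_of_nonneg (le_of_lt hp)]
    _ = (T % 10 ^ j / 10 ^ j + (T / 10 ^ j + S)) / 10 := by
        rw [Int.add_mul_ediv_left _ _ (show ((10:Int) ^ j) ≠ 0 by positivity)]
    _ = (T / 10 ^ j + S) / 10 := by
        rw [Int.ediv_eq_zero_of_lt hr0 hrlt, zero_add]

theorem pv_qs_step (xs : List Int) (j : Nat) :
    (xs.map (fun n => PySem.Int.floordiv n ((10:Int) ^ j))).map (fun q => PySem.Int.floordiv q 10)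
      = xs.map (fun n => PySem.Int.floordiv n ((10:Int) ^ (j+1))) := by
  rw [List.map_map]
  apply List.map_congr_left
  intro n _
  have hp : (0:Int) < 10 ^ j := by positivity
  simp only [Function.comp]
  rw [PySem.Int.floordiv_eq_ediv_of_pos hp,
      PySem.Int.floordiv_eq_ediv_of_pos (show (0:Int) < 10 by norm_num),
      PySem.Int.floordiv_eq_ediv_of_pos (show (0:Int) < 10 ^ (j+1) by positivity),
      Int.ediv_ediv_of_nonneg (le_of_lt hp), ← pow_succ]

theorem pv_inner_fold (qs : List Int) (c0 : Int) (acc : List Int) :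
    qs.foldl (fun (p : Int × List Int) q => (p.1 + PySem.Int.mod q 10, p.2 ++ [PySem.Int.floordiv q 10])) (c0, acc)
      = (c0 + (qs.map (fun q => PySem.Int.mod q 10)).sum, acc ++ qs.map (fun q => PySem.Int.floordiv q 10)) := by
  induction qs generalizing c0 acc with
  | nil => simp
  | cons q t ih =>
    simp only [List.foldl_cons, List.map_cons, List.sum_cons]
    rw [ih]
    simp [add_assoc]

theorem pv_S_eq (xs : List Int) (j : Nat) :
    ((xs.map (fun n => PySem.Int.floordiv n ((10:Int) ^ j))).map (fun q => PySem.Int.mod q 10)).sum = pvS xs j := by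
  unfold pvS
  rw [List.map_map]
  rfl

theorem pv_fdiv_pow_zero (xs : List Int) :
    xs.map (fun n => PySem.Int.floordiv n ((10:Int) ^ 0)) = xs := by
  have h : ∀ n : Int, PySem.Int.floordiv n ((10:Int) ^ 0) = n := by
    intro n
    rw [pow_zero, PySem.Int.floordiv_eq_ediv_of_pos (show (0:Int) < 1 by norm_num)]
    exact Int.ediv_one n
  calc xs.map (fun n => PySem.Int.floordiv n ((10:Int) ^ 0)) = xs.map (fun n => n) := List.map_congr_left (fun n _ => h n)
    _ = xs := List.map_id' xs

-- B's loop state after M iterations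
theorem pvB_invariant (xs : List Int) (M : Nat) :
    ((List.range M).map (fun k : Nat => (0:Int) + (k : Int))).foldl
      (fun (st : List Int × Int × List String) (_ : Int) =>
        let r := st.1.foldl (fun (p : Int × List Int) q =>
            (p.1 + PySem.Int.mod q 10, p.2 ++ [PySem.Int.floordiv q 10])) (st.2.1, [])
        let carry := PySem.Int.floordiv r.1 10
        (r.2, carry, st.2.2 ++ [PySem.Int.toStr (PySem.Int.mod carry 10)]))
      (xs, 0, ["0"])
    = (xs.map (fun n => PySem.Int.floordiv n ((10:Int) ^ M)), pvC xs M,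
       "0" :: (List.range M).map (fun k => PySem.Int.toStr (PySem.Int.mod (pvC xs (k+1)) 10))) := by
  induction M with
  | zero =>
    simp only [List.range_zero, List.map_nil, List.foldl_nil, pvC_zero, pv_fdiv_pow_zero]
  | succ M ih =>
    rw [List.range_succ, List.map_append, List.foldl_append, ih]
    simp only [List.map_cons, List.map_nil, List.foldl_cons, List.foldl_nil]
    rw [pv_inner_fold]
    simp only [List.nil_append, pv_S_eq, pv_qs_step, List.map_append, List.map_cons, List.map_nil]
    rw [← pvC_succ]
    simp

-- ===== VERDICT (by name: the statement is the Claim_ definition above) =====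
theorem carries_spec : Claim_equal_carries := by
  intro nlist _ _
  unfold Spec_carries carries carries_alt
  cases h : PySem.List.max? nlist (fun x => x) with
  | none => rfl
  | some mx =>
    simp only
    have hm0 : 0 ≤ PySem.Str.len (PySem.Int.toStr mx) := by
      rw [PySem.Str.len_eq]
      exact Int.natCast_nonneg _
    set M : Nat := (PySem.Str.len (PySem.Int.toStr mx)).toNat with hM
    have hrangeA : PySem.List.pyRange 1 (PySem.Str.len (PySem.Int.toStr mx) + 1) 1
        = (List.range M).map (fun k : Nat => (1:Int) + (k : Int)) := by
      rw [PySem.List.pyRange_one]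
      congr 2
      omega
    have hrangeB : PySem.List.pyRange 0 (PySem.Str.len (PySem.Int.toStr mx)) 1
        = (List.range M).map (fun k : Nat => (0:Int) + (k : Int)) := by
      rw [PySem.List.pyRange_one]
      congr 2
    rw [hrangeA, hrangeB, pv_foldl_snoc, List.map_map, pvB_invariant nlist M]
    have hdig : (List.range M).map ((fun i : Int => PySem.Int.mod (PySem.Int.floordiv
          (nlist.foldl (fun t n => t + PySem.Int.mod n ((10:Int) ^ i.toNat)) 0) ((10:Int) ^ i.toNat)) 10)
            ∘ (fun k : Nat => (1:Int) + (k : Int)))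
        = (List.range M).map (fun k => PySem.Int.mod (pvC nlist (k+1)) 10) := by
      apply List.map_congr_left
      intro k _
      simp only [Function.comp]
      have ht : ((1:Int) + (k : Int)).toNat = k + 1 := by omega
      rw [ht]
      rfl
    rw [hdig]
    apply congrArg
    have h0 : PySem.Int.toStr 0 = "0" := rfl
    simp only [List.reverse_cons, List.reverse_append, List.map_append, List.map_reverse,
               List.map_map, List.map_cons, List.map_nil, List.reverse_nil, List.nil_append, h0]
    rfl
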